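-- pv_equiv track=rewrite | github.com/pozorvlak/cassidoo | 2021-01-11_largest_rect/largest_rect.py | get_horizontal_streaks
-- ===== SOURCE A (Python) =====
-- def get_horizontal_streaks(matrix):
--     horiz_streaks = []
--     for row in matrix:
--         streaks = []
--         current_streak = 0
--         for val in row:
--             if val == "1":
--                 current_streak += 1
--             else:
--                 current_streak = 0
--             streaks.append(current_streak)
--         horiz_streaks.append(streaks)
--     return horiz_streaks
-- ===== SOURCE B (Python) =====
-- def get_horizontal_streaks(matrix):
--     horiz_streaks = []
--     for row in matrix:
--         streaks = []
--         i = 0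
--         n = len(row)
--         while i < n:
--             # scan the maximal run of elements equal to row[i]
--             j = i + 1
--             while j < n and row[j] == row[i]:
--                 j += 1
--             length = j - i
--             if row[i] == "1":
--                 streaks.extend(range(1, length + 1))
--             else:
--                 streaks.extend([0] * length)
--             i = j
--         horiz_streaks.append(streaks)
--     return horiz_streaks
-- ===== Notes on version B (the rewrite author's own statement) =====
-- stated objective: alternative
-- what changed: Replaces the cell-by-cell running counter with a run-splitting pass: each row is cut into maximal runs of equal values and a run of '1's of length L is emitted as 1..L, any other run as zeros.
import Mathlib
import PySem

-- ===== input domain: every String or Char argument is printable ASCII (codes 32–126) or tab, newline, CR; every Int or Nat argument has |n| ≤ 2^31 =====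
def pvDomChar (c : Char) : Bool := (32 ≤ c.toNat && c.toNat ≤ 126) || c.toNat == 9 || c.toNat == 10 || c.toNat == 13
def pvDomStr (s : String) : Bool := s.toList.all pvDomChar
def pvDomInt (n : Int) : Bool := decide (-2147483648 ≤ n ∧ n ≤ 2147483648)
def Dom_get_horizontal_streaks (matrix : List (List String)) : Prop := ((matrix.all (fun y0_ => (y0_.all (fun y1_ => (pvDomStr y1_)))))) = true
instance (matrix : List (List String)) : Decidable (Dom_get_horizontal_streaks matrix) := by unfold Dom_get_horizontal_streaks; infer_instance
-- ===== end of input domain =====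

-- B replaces A's cell-by-cell running counter with a run-splitting pass (maximal runs of
-- equal values, a run of '1's of length L emitted as 1..L, any other run as zeros); same cost.


-- ===== PORT A =====
-- A: for each row, a running counter over the cells (reset on anything ≠ "1"), appending each value.
def get_horizontal_streaks (matrix : List (List String)) : List (List Int) :=
  matrix.foldl (fun horiz_streaks row =>
    let streaks :=
      (row.foldl (fun (st : List Int × Int) val =>
        let current_streak := if val = "1" then st.2 + 1 else 0
        (st.1 ++ [current_streak], current_streak)) ([], 0)).1
    horiz_streaks ++ [streaks]) []

-- ===== PORT B =====
-- B helper: split a list into maximal runs of equal values, as (value, length) pairs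
-- (transliterates Source B's inner while-loop that scans j forward over equal elements).
def pvRuns : List String → List (String × Nat)
  | [] => []
  | x :: xs =>
    (x, (xs.takeWhile (fun y => y == x)).length + 1) :: pvRuns (xs.dropWhile (fun y => y == x))
termination_by l => l.length
decreasing_by
  simpa using Nat.lt_succ_of_le (List.length_dropWhile_le _ _)

def pvRowStreaks (row : List String) : List Int :=
  (pvRuns row).flatMap (fun p =>
    if p.1 = "1" then (List.range p.2).map (fun i : Nat => (i : Int) + 1)
    else List.replicate p.2 0)

def get_horizontal_streaks_alt (matrix : List (List String)) : List (List Int) :=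
  matrix.map pvRowStreaks

-- ===== PRECONDITION & SPEC =====
def Spec_get_horizontal_streaks (matrix : List (List String)) (out : List (List Int)) : Prop := out = get_horizontal_streaks_alt matrix
instance (matrix : List (List String)) (out : List (List Int)) : Decidable (Spec_get_horizontal_streaks matrix out) := by unfold Spec_get_horizontal_streaks; infer_instance

-- ===== CLAIM (what is proved, stated in full; the proofs are below) =====
def Claim_equal_get_horizontal_streaks : Prop := ∀ (matrix : List (List String)), Dom_get_horizontal_streaks matrix → Spec_get_horizontal_streaks matrix (get_horizontal_streaks matrix)

-- ===== LEMMAS AND PROOFS =====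

-- A's inner loop as a carry-passing recursion (proof helper only).
def pvFA (c : Int) : List String → List Int
  | [] => []
  | v :: vs =>
    let c' := if v = "1" then c + 1 else 0
    c' :: pvFA c' vs

theorem pvFA_eq_foldl (row : List String) : ∀ (acc : List Int) (c : Int),
    (row.foldl (fun (st : List Int × Int) val =>
      let current_streak := if val = "1" then st.2 + 1 else 0
      (st.1 ++ [current_streak], current_streak)) (acc, c)).1 = acc ++ pvFA c row := by
  induction row with
  | nil => simp [pvFA]
  | cons v vs ih => intro acc c; simp [pvFA, ih]

theorem pvFA_carry_irrel (c c' : Int) : ∀ (rest : List String),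
    (rest = [] ∨ ∃ y ys, rest = y :: ys ∧ y ≠ "1") → pvFA c rest = pvFA c' rest := by
  rintro rest (rfl | ⟨y, ys, rfl, hy⟩)
  · rfl
  · simp [pvFA, hy]

theorem pvFA_ones : ∀ (l : List String), (∀ y ∈ l, y = "1") → ∀ (c : Int) (rest : List String),
    pvFA c (l ++ rest) =
      (List.range l.length).map (fun i : Nat => c + (i : Int) + 1) ++ pvFA (c + l.length) rest := by
  intro l
  induction l with
  | nil => intro _ c rest; simp
  | cons y l ih =>
    intro h c rest
    have hy : y = "1" := h y (by simp)
    have hl : ∀ z ∈ l, z = "1" := fun z hz => h z (by simp [hz])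
    subst hy
    have hstep : pvFA c ("1" :: (l ++ rest)) = (c + 1) :: pvFA (c + 1) (l ++ rest) := by
      simp [pvFA]
    rw [List.cons_append, hstep, ih hl (c + 1) rest]
    simp only [List.length_cons]
    rw [List.range_succ_eq_map]
    simp only [List.map_cons, List.map_map, List.cons_append]
    have h0 : c + ((0 : Nat) : Int) + 1 = c + 1 := by push_cast; ring
    have h1 : ((fun i : Nat => c + (i : Int) + 1) ∘ Nat.succ) = fun i : Nat => (c + 1) + (i : Int) + 1 := by
      funext i; simp [Function.comp]; ring
    have h2 : c + ((l.length + 1 : Nat) : Int) = c + 1 + (l.length : Int) := by push_cast; ring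
    rw [h0, h1, h2]

theorem pvFA_zeros : ∀ (l : List String), (∀ y ∈ l, y ≠ "1") → ∀ (rest : List String),
    pvFA 0 (l ++ rest) = List.replicate l.length 0 ++ pvFA 0 rest := by
  intro l
  induction l with
  | nil => intro _ rest; simp
  | cons y l ih =>
    intro h rest
    have hy : y ≠ "1" := h y (by simp)
    have hl : ∀ z ∈ l, z ≠ "1" := fun z hz => h z (by simp [hz])
    have hstep : pvFA 0 (y :: (l ++ rest)) = 0 :: pvFA 0 (l ++ rest) := by
      simp [pvFA, hy]
    rw [List.cons_append, hstep, ih hl rest]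
    simp [List.replicate_succ]

theorem pvDropWhile_head {p : String → Bool} : ∀ (l : List String) (y : String) (ys : List String),
    l.dropWhile p = y :: ys → p y = false := by
  intro l
  induction l with
  | nil => intro y ys h; simp [List.dropWhile] at h
  | cons a l ih =>
    intro y ys h
    by_cases ha : p a
    · exact ih y ys (by simpa [List.dropWhile, ha] using h)
    · rw [List.dropWhile_cons_of_neg (by simpa using ha)] at h
      cases h; simpa using ha

theorem pvRowEq : ∀ (n : Nat) (row : List String), row.length ≤ n →
    pvFA 0 row = pvRowStreaks row := by
  intro n
  induction n with
  | zero =>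
    intro row h
    have : row = [] := List.eq_nil_of_length_eq_zero (Nat.le_zero.mp h)
    subst this
    simp [pvRowStreaks, pvRuns, pvFA]
  | succ n ih =>
    intro row h
    match row with
    | [] => simp [pvRowStreaks, pvRuns, pvFA]
    | x :: xs =>
      obtain ⟨s, hs⟩ : ∃ s, s = xs.takeWhile (fun y => y == x) := ⟨_, rfl⟩
      obtain ⟨r, hr⟩ : ∃ r, r = xs.dropWhile (fun y => y == x) := ⟨_, rfl⟩
      have hxs : s ++ r = xs := by rw [hs, hr]; exact List.takeWhile_append_dropWhile
      have hrlen : r.length ≤ n := by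
        have h0 := List.length_dropWhile_le (fun y => y == x) xs
        rw [← hr] at h0
        simp only [List.length_cons] at h
        omega
      have hsmem : ∀ y ∈ s, y = x := by
        intro y hy
        rw [hs] at hy
        have := List.mem_takeWhile_imp hy
        simpa using this
      have hrhd : r = [] ∨ ∃ y ys, r = y :: ys ∧ y ≠ x := by
        match hrr : r with
        | [] => exact Or.inl rfl
        | y :: ys =>
          refine Or.inr ⟨y, ys, rfl, ?_⟩
          have := pvDropWhile_head xs y ys hr.symm
          simpa using this
      have hruns : pvRuns (x :: xs) = (x, s.length + 1) :: pvRuns r := by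
        rw [hs, hr]; simp only [pvRuns]
      have hrB : pvFA 0 r = pvRowStreaks r := ih r hrlen
      have hB : pvRowStreaks (x :: xs) =
          (if x = "1" then (List.range (s.length + 1)).map (fun i : Nat => (i : Int) + 1)
           else List.replicate (s.length + 1) 0) ++ pvRowStreaks r := by
        unfold pvRowStreaks
        rw [hruns, List.flatMap_cons]
      have hsplit : pvFA 0 (x :: xs) = pvFA 0 ((x :: s) ++ r) := by
        rw [List.cons_append, hxs]
      rw [hB]
      by_cases hx : x = "1"
      · have hall : ∀ y ∈ x :: s, y = "1" := by
          intro y hy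
          rcases List.mem_cons.mp hy with rfl | hy
          · exact hx
          · rw [hsmem y hy]; exact hx
        have hcarry : pvFA ((0 : Int) + ((x :: s).length : Int)) r = pvFA 0 r := by
          apply pvFA_carry_irrel
          rcases hrhd with h0 | ⟨y, ys, hyy, hy⟩
          · exact Or.inl h0
          · exact Or.inr ⟨y, ys, hyy, hx ▸ hy⟩
        rw [hsplit, pvFA_ones (x :: s) hall 0 r, hcarry, hrB, if_pos hx]
        congr 1
        simp only [List.length_cons]
        apply List.map_congr_left
        intro i _; ring
      · have hall : ∀ y ∈ x :: s, y ≠ "1" := by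
          intro y hy
          rcases List.mem_cons.mp hy with rfl | hy
          · exact hx
          · rw [hsmem y hy]; exact hx
        rw [hsplit, pvFA_zeros (x :: s) hall r, hrB, if_neg hx]
        simp

theorem pvRow_final (row : List String) :
    (row.foldl (fun (st : List Int × Int) val =>
      let current_streak := if val = "1" then st.2 + 1 else 0
      (st.1 ++ [current_streak], current_streak)) ([], 0)).1 = pvRowStreaks row := by
  rw [pvFA_eq_foldl row [] 0, List.nil_append]
  exact pvRowEq row.length row (le_refl _)

theorem pvOuter (matrix : List (List String)) : ∀ (acc : List (List Int)),
    matrix.foldl (fun horiz_streaks row =>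
      let streaks :=
        (row.foldl (fun (st : List Int × Int) val =>
          let current_streak := if val = "1" then st.2 + 1 else 0
          (st.1 ++ [current_streak], current_streak)) ([], 0)).1
      horiz_streaks ++ [streaks]) acc = acc ++ matrix.map pvRowStreaks := by
  induction matrix with
  | nil => intro acc; simp
  | cons row rows ih =>
    intro acc
    simp only [List.foldl_cons, List.map_cons]
    rw [ih, pvRow_final, List.append_assoc]
    rfl

-- ===== VERDICT (by name: the statement is the Claim_ definition above) =====
theorem get_horizontal_streaks_spec : Claim_equal_get_horizontal_streaks := by
  intro matrix _
  show get_horizontal_streaks matrix = get_horizontal_streaks_alt matrix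
  unfold get_horizontal_streaks get_horizontal_streaks_alt
  simpa using pvOuter matrix []
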